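-- pv_equiv track=rewrite | github.com/krju13/SolveTheCheckioProblem | Home and elements island/is_stressful.py | is_stressful
-- ===== SOURCE A (Python) =====
-- def removesame(sub):
--     a=' '
--     for n in sub:
--         if n!=a[-1]:
--             a+=n
--     return a
--
-- def check_help(sub):
--     return True if sub.find("help")>-1 else False
--
-- def check_asap(sub):
--     return True if sub.find("asap")>-1 else False
--
-- def check_urgent(sub):
--     return True if sub.find("urgent")>-1 else False
--
-- def is_stressful(subj):
--     if subj[-3:] =="!!!":
--         return True
--     if subj.isupper():
--         return True
--     subj=''.join([i for i in subj.lower() if i.isalpha()])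
--     subj=removesame(subj).lstrip()
--     return check_help(subj)|check_asap(subj)|check_urgent(subj)
-- ===== SOURCE B (Python) =====
-- def _match_at(kw, s, i):
--     # does s[i:] begin with kw, each keyword letter possibly stretched (repeated)?
--     for ch in kw:
--         if i >= len(s) or s[i] != ch:
--             return False
--         i += 1
--         while i < len(s) and s[i] == ch:
--             i += 1
--     return True
--
--
-- def _search(kw, s):
--     # stretched occurrence of kw anywhere in s; restart only at run starts
--     i = 0
--     while True:
--         if _match_at(kw, s, i):
--             return True
--         if i >= len(s):
--             return False
--         c = s[i]
--         i += 1
--         while i < len(s) and s[i] == c: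
--             i += 1
--
--
-- def is_stressful(subj):
--     if subj[-3:] == "!!!":
--         return True
--     if subj.isupper():
--         return True
--     letters = ''.join(c for c in subj.lower() if c.isalpha())
--     return any(_search(kw, letters) for kw in ("help", "asap", "urgent"))
-- ===== Notes on version B (the rewrite author's own statement) =====
-- stated objective: alternative
-- what changed: A collapses repeated adjacent letters into a normalized string and then substring-searches each keyword; B drops the collapse pass and the three find helpers and instead matches each keyword directly on the raw letter string with a stretched matcher that lets every keyword letter repeat.
import Mathlib
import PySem

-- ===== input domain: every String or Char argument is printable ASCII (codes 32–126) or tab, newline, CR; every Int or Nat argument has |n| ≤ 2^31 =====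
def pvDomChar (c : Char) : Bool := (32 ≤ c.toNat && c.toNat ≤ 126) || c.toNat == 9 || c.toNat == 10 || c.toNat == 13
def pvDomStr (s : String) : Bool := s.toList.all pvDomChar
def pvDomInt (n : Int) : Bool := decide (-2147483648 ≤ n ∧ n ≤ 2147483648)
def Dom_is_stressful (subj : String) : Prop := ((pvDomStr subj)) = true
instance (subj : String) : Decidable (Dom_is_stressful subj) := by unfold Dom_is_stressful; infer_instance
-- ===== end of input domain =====

-- B replaces A's collapse-runs-then-substring-search pipeline by a direct stretched-keyword
-- matcher run on the raw letter string (objective: alternative algorithm, similar cost).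

-- ===== PORT A =====
-- a[-1] on the accumulator: exact, because the accumulator starts as " " and only grows,
-- so PySem.List.pyGet? never returns none and the .getD default is never used.
def removesame (sub : List Char) : List Char :=
  sub.foldl (fun a n => if n ≠ (PySem.List.pyGet? a (-1)).getD ' ' then a ++ [n] else a) [' ']

def check_help (sub : List Char) : Bool :=
  if PySem.Chars.find sub "help".toList > -1 then true else false

def check_asap (sub : List Char) : Bool :=
  if PySem.Chars.find sub "asap".toList > -1 then true else false

def check_urgent (sub : List Char) : Bool :=
  if PySem.Chars.find sub "urgent".toList > -1 then true else false

-- str.isupper() ported by hand (no PySem primitive): at least one cased character and no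
-- lowercase one; exact on the ASCII domain, where the cased characters are exactly the letters.
def pvStrIsupper (cs : List Char) : Bool :=
  cs.any PySem.Chars.isalpha && cs.all (fun c => !PySem.Chars.islower c)

def is_stressful (subj : String) : Bool :=
  let cs := subj.toList
  if PySem.List.slice cs (some (-3)) none = "!!!".toList then true
  else if pvStrIsupper cs then true
  else
    let s := (PySem.Chars.lower cs).filter PySem.Chars.isalpha
    let t := PySem.Chars.lstrip (removesame s)
    check_help t || check_asap t || check_urgent t

-- ===== PORT B =====
-- does s begin with kw, each keyword letter possibly stretched (repeated)?
def matchStretched (kw s : List Char) : Bool :=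
  match kw, s with
  | [], _ => true
  | _ :: _, [] => false
  | c :: kw', d :: s' => d == c && matchStretched kw' (s'.dropWhile (· == c))

-- stretched occurrence of kw anywhere in s; Source B's loop restarts only at run starts
def searchStretched (kw : List Char) (s : List Char) : Bool :=
  matchStretched kw s ||
    match s with
    | [] => false
    | d :: s' => searchStretched kw (s'.dropWhile (· == d))
termination_by s.length
decreasing_by exact Nat.lt_succ_of_le (List.length_dropWhile_le _ _)

def is_stressful_alt (subj : String) : Bool :=
  let cs := subj.toList
  if PySem.List.slice cs (some (-3)) none = "!!!".toList then true
  else if pvStrIsupper cs then true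
  else
    let letters := (PySem.Chars.lower cs).filter PySem.Chars.isalpha
    ["help".toList, "asap".toList, "urgent".toList].any (fun kw => searchStretched kw letters)

-- ===== PRECONDITION & SPEC =====
def Spec_is_stressful (subj : String) (out : Bool) : Prop := out = is_stressful_alt subj
instance (subj : String) (out : Bool) : Decidable (Spec_is_stressful subj out) := by unfold Spec_is_stressful; infer_instance

-- ===== CLAIM (what is proved, stated in full; the proofs are below) =====
def Claim_equal_is_stressful : Prop := ∀ (subj : String), Dom_is_stressful subj → Spec_is_stressful subj (is_stressful subj)

-- ===== LEMMAS AND PROOFS =====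

-- canonical run-collapse (adjacent duplicates removed), used only in the proofs
def pvDedup : List Char → List Char
  | [] => []
  | c :: s => c :: pvDedup (s.dropWhile (· == c))
termination_by s => s.length
decreasing_by exact Nat.lt_succ_of_le (List.length_dropWhile_le _ _)

-- run-collapse relative to a previous character (A's loop state)
def pvDedupFrom (p : Char) : List Char → List Char
  | [] => []
  | c :: s => if c = p then pvDedupFrom p s else c :: pvDedupFrom c s

theorem pvGetLast (xs : List Char) (p : Char) :
    (PySem.List.pyGet? (xs ++ [p]) (-1)).getD ' ' = p := by
  simp [PySem.List.pyGet?, PySem.List.pyIdx?]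

theorem removesame_foldl (s : List Char) : ∀ (xs : List Char) (p : Char),
    s.foldl (fun a n => if n ≠ (PySem.List.pyGet? a (-1)).getD ' ' then a ++ [n] else a) (xs ++ [p])
      = (xs ++ [p]) ++ pvDedupFrom p s := by
  induction s with
  | nil => intro xs p; simp [pvDedupFrom]
  | cons c s ih =>
    intro xs p
    rw [List.foldl_cons]
    by_cases h : c = p
    · subst h
      simp only [pvGetLast, ne_eq, not_true_eq_false, if_false]
      rw [ih xs c, pvDedupFrom]
      simp
    · simp only [pvGetLast, ne_eq, h, not_false_eq_true, if_true]
      rw [ih (xs ++ [p]) c, pvDedupFrom]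
      simp [h]

theorem pvDedupFrom_eq (s : List Char) : ∀ p, pvDedupFrom p s = pvDedup (s.dropWhile (· == p)) := by
  induction s with
  | nil => intro p; simp [pvDedupFrom, pvDedup]
  | cons c s ih =>
    intro p
    by_cases h : c = p
    · simp [pvDedupFrom, h, ih p]
    · simp [pvDedupFrom, h, pvDedup, ih c]

theorem pvDedup_subset (s : List Char) : ∀ c, c ∈ pvDedup s → c ∈ s := by
  induction s using pvDedup.induct with
  | case1 => simp [pvDedup]
  | case2 c s ih =>
    intro d hd
    rw [pvDedup] at hd
    rcases List.mem_cons.1 hd with h | h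
    · simp [h]
    · exact List.mem_cons_of_mem _ ((List.dropWhile_sublist _).subset (by simpa using ih d h))

theorem dropWhile_of_head (p : Char) (s : List Char) (h : s.head? ≠ some p) :
    s.dropWhile (· == p) = s := by
  cases s with
  | nil => rfl
  | cons c s =>
    have : ¬ (c == p) = true := by simpa using fun hc => h (by simp [hc])
    simp [this]

theorem matchStretched_eq (kw : List Char) : ∀ s,
    matchStretched kw s = decide (kw <+: pvDedup s) := by
  induction kw with
  | nil => intro s; simp [matchStretched]
  | cons c kw' ih =>
    intro s
    cases s with
    | nil => simp [matchStretched, pvDedup]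
    | cons d s' =>
      rw [matchStretched, pvDedup, ih]
      by_cases h : d = c
      · subst h; simp
      · simp [h, Ne.symm h]

theorem searchStretched_eq (kw : List Char) (hk : kw ≠ []) : ∀ s,
    searchStretched kw s = decide (kw <:+: pvDedup s) := by
  have key : ∀ (n : Nat) (s : List Char), s.length ≤ n →
      searchStretched kw s = decide (kw <:+: pvDedup s) := by
    intro n
    induction n with
    | zero =>
      intro s hs
      rw [List.length_eq_zero_iff.1 (Nat.le_zero.1 hs)]
      rw [searchStretched, matchStretched_eq, pvDedup]
      simp [List.prefix_nil, hk]
    | succ n ih =>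
      intro s hs
      cases s with
      | nil =>
        rw [searchStretched, matchStretched_eq, pvDedup]
        simp [List.prefix_nil, hk]
      | cons d s' =>
        have hlen : (s'.dropWhile (· == d)).length ≤ n :=
          le_trans (List.length_dropWhile_le _ _) (by simpa using hs)
        rw [searchStretched, matchStretched_eq, ih _ hlen, pvDedup]
        by_cases hp : kw <+: d :: pvDedup (s'.dropWhile (· == d)) <;>
          by_cases hi : kw <:+: pvDedup (s'.dropWhile (· == d)) <;>
          simp [hp, hi, List.infix_cons_iff]
  exact fun s => key s.length s le_rfl

theorem alpha_not_space (c : Char) (h : PySem.Chars.isalpha c = true) :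
    PySem.Chars.isspace c = false := by
  simp only [PySem.Chars.isalpha, PySem.Chars.isupper, PySem.Chars.islower, Bool.or_eq_true,
    Bool.and_eq_true, decide_eq_true_eq, Char.le_def, UInt32.le_iff_toNat_le] at h
  simp only [PySem.Chars.isspace]
  simp only [show ('A'.val.toNat = 65) from rfl, show ('Z'.val.toNat = 90) from rfl,
    show ('a'.val.toNat = 97) from rfl, show ('z'.val.toNat = 122) from rfl] at h
  have hc : c.toNat = c.val.toNat := rfl
  simp only [Bool.or_eq_false_iff, Bool.and_eq_false_iff, decide_eq_false_iff_not, hc]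
  omega

theorem alpha_ne_space (c : Char) (h : PySem.Chars.isalpha c = true) : c ≠ ' ' := by
  intro hc; subst hc; simp [PySem.Chars.isalpha, PySem.Chars.isupper, PySem.Chars.islower] at h

theorem check_eq (t kw : List Char) :
    (if PySem.Chars.find t kw > -1 then true else false) = decide (kw <:+: t) := by
  by_cases h : kw <:+: t
  · have := (PySem.Chars.find_nonneg_iff t kw).2 h
    simp [h]; omega
  · have h2 : ¬ (0 ≤ PySem.Chars.find t kw) := fun h0 => h ((PySem.Chars.find_nonneg_iff t kw).1 h0)
    simp [h]; omega

theorem pvLstrip_dedup (s : List Char) (hs : ∀ c ∈ s, PySem.Chars.isalpha c = true) :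
    PySem.Chars.lstrip (removesame s) = pvDedup s := by
  have hhead : s.head? ≠ some ' ' := by
    cases s with
    | nil => simp
    | cons c s =>
      simp only [List.head?_cons, ne_eq, Option.some_inj]
      exact alpha_ne_space c (hs c (by simp))
  have h1 : removesame s = [' '] ++ pvDedupFrom ' ' s := by
    rw [removesame, show ([' '] : List Char) = [] ++ [' '] from rfl, removesame_foldl]
  rw [h1, pvDedupFrom_eq, dropWhile_of_head _ _ hhead]
  show PySem.Chars.lstrip (' ' :: pvDedup s) = pvDedup s
  rw [PySem.Chars.lstrip, List.dropWhile_cons]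
  have hsp : PySem.Chars.isspace ' ' = true := by decide
  rw [if_pos hsp]
  cases hX : pvDedup s with
  | nil => rfl
  | cons x xs =>
    have hx : x ∈ pvDedup s := by rw [hX]; simp
    have : PySem.Chars.isspace x = false :=
      alpha_not_space x (hs x (pvDedup_subset s x hx))
    simp [this]

-- ===== VERDICT (by name: the statement is the Claim_ definition above) =====
theorem is_stressful_spec : Claim_equal_is_stressful := by
  unfold Claim_equal_is_stressful
  intro subj _
  unfold Spec_is_stressful is_stressful is_stressful_alt
  simp only []
  by_cases h1 : PySem.List.slice subj.toList (some (-3)) none = "!!!".toList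
  · simp [h1]
  · rw [if_neg h1, if_neg h1]
    by_cases h2 : pvStrIsupper subj.toList = true
    · simp [h2]
    · rw [if_neg h2, if_neg h2]
      set s := (PySem.Chars.lower subj.toList).filter PySem.Chars.isalpha with hsdef
      have hs : ∀ c ∈ s, PySem.Chars.isalpha c = true := by
        intro c hc
        exact (List.mem_filter.1 (hsdef ▸ hc)).2
      rw [check_help, check_asap, check_urgent, pvLstrip_dedup s hs]
      rw [check_eq, check_eq, check_eq]
      simp only [List.any_cons, List.any_nil, Bool.or_false]
      rw [searchStretched_eq _ (by decide), searchStretched_eq _ (by decide),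
        searchStretched_eq _ (by decide)]
      rw [Bool.or_assoc]
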